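-- pv_equiv track=rewrite | github.com/anirudhaps/Python_Programs | basics/think-python-ex/python-files/rotate_pairs.py | rotate_pairs
-- ===== SOURCE A (Python) =====
-- def is_rotate_pairs(a,b):
--     # a and b are strings
--     la = list(a)
--     lb = list(b)
--     if len(la)!=len(lb):
--         return False
--     base_diff = ord(la[0]) - ord(lb[0])
--     i=1
--     while i<len(la):
--         diff = ord(la[i]) - ord(lb[i])
--         if diff!=base_diff:
--             return False
--         i+=1
--     return True
--
-- def rotate_pairs(lst):
--     output = []
--     for s in lst:
--         out_lst = []
--         i=lst.index(s)+1
--         while i<len(lst):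
--             if is_rotate_pairs(s,lst[i]):
--                 if s not in out_lst:
--                     out_lst.append(s)
--                 out_lst.append(lst[i])
--             i+=1
--         output.append(out_lst)
--     return output
-- ===== SOURCE B (Python) =====
-- def rotate_pairs(lst):
--     # One pass builds: key(s) -> ascending index list, and first index of each string.
--     # Then each output row is read off the key group: hash-indexed, no pairwise rescans.
--     def key(s):
--         base = ord(s[0]) if s else 0
--         return tuple(ord(c) - base for c in s)
--     first = {}
--     groups = {}
--     for j, s in enumerate(lst):
--         if s not in first:
--             first[s] = j
--         groups.setdefault(key(s), []).append(j)
--     output = []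
--     for s in lst:
--         start = first[s] + 1
--         tail = [lst[i] for i in groups[key(s)] if i >= start]
--         output.append([s] + tail if tail else [])
--     return output
-- ===== Notes on version B (the rewrite author's own statement) =====
-- stated objective: faster
-- what changed: Replaces A's quadratic all-pairs rotate test (plus an O(n) lst.index rescan per element) with one pass that buckets each string under its shift-normalized difference key and records first-occurrence indices, so each output row is read straight off its key bucket.
-- crash fix: On lists containing two or more empty strings A raises IndexError (ord(la[0]) on ''), while B groups the empty strings together (all empty strings share the key ()). — e.g. on rotate_pairs(["", ""]): A raises IndexError, B returns [["", ""], ["", ""]]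
import Mathlib
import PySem

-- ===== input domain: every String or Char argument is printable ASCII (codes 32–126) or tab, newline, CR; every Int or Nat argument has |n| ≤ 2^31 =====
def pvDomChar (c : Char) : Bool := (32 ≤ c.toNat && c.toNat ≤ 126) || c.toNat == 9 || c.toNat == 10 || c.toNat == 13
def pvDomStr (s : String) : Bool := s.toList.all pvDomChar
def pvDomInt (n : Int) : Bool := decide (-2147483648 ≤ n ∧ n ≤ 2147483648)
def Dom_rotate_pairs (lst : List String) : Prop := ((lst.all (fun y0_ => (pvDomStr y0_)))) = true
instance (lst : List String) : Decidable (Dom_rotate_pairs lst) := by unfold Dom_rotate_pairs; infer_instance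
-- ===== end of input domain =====

-- B replaces A's all-pairs rescan by one hashing pass (shift-normalized key -> index list); equivalence is about return values (A raises IndexError when two empty strings meet — excluded by Pre_, B returns there).

-- ===== PORT A =====
-- Python's inner while over i=1.. : structural recursion over the two tails.
def irpLoop (xs ys : List Char) (base : Int) : Bool :=
  match xs, ys with
  | x :: xs', y :: ys' =>
      if ((x.toNat : Int) - (y.toNat : Int)) ≠ base then false else irpLoop xs' ys' base
  | _, _ => true

def is_rotate_pairs (a b : String) : Bool :=
  let la := a.toList
  let lb := b.toList
  if la.length ≠ lb.length then false
  else
    -- Python reads la[0]/lb[0]: IndexError when both are empty — outside Pre_; headD stands in there.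
    irpLoop la.tail lb.tail (((la.headD ' ').toNat : Int) - ((lb.headD ' ').toNat : Int))

-- the body of A's inner while loop
def aStep (s : String) (out : List String) (t : String) : List String :=
  if is_rotate_pairs s t then (if out.contains s then out else out ++ [s]) ++ [t] else out

def rotate_pairs (lst : List String) : List (List String) :=
  lst.foldl (fun output s =>
    -- i = lst.index(s) + 1; while i < len(lst): … lst[i] …  — rendered as a fold over lst.drop i
    let i := (PySem.List.index? lst s).getD 0 + 1
    let out_lst := (lst.drop i).foldl (aStep s) []
    output ++ [out_lst]) []

-- ===== PORT B =====
def keyOf (s : String) : List Int :=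
  let cs := s.toList
  let base : Int := match cs with | [] => 0 | c :: _ => (c.toNat : Int)
  cs.map (fun c => (c.toNat : Int) - base)

-- one enumerate pass: first occurrence index per string, and key -> ascending index list
def buildMaps (lst : List String) :
    PySem.Dict String Int × PySem.Dict (List Int) (List Int) :=
  (PySem.List.enumerate lst).foldl
    (fun fg p =>
      ((if fg.1.contains p.2 then fg.1 else fg.1.insert p.2 p.1),
       fg.2.modify (keyOf p.2) [] (fun g => g ++ [p.1])))
    (PySem.Dict.empty, PySem.Dict.empty)

def rotate_pairs_alt (lst : List String) : List (List String) :=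
  let fg := buildMaps lst
  lst.map (fun s =>
    let start := fg.1.getD s 0 + 1
    let tail := ((fg.2.getD (keyOf s) []).filter (fun i => start ≤ i)).map
      (fun i => PySem.List.pyGetD lst i "")
    if tail.isEmpty then [] else s :: tail)

-- ===== PRECONDITION & SPEC =====
-- Pre_ excludes lists containing two or more empty strings: there A raises IndexError (ord(la[0]) on '').
def Pre_rotate_pairs (lst : List String) : Prop := PySem.List.count lst "" ≤ 1
instance (lst : List String) : Decidable (Pre_rotate_pairs lst) := by unfold Pre_rotate_pairs; infer_instance
def pvWitness_rotate_pairs : List String := ["abc", "bcd", "xy", ""]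

-- A raises IndexError on lists with at least two empty strings; B groups the empty strings together there.
def Raises_rotate_pairs (lst : List String) : Prop := 2 ≤ PySem.List.count lst ""
instance (lst : List String) : Decidable (Raises_rotate_pairs lst) := by unfold Raises_rotate_pairs; infer_instance
def pvRaiseWitness_rotate_pairs : List String := ["", ""]
def pvRaiseWitnessOut_rotate_pairs : List (List String) := [["", ""], ["", ""]]

def Spec_rotate_pairs (lst : List String) (out : List (List String)) : Prop := out = rotate_pairs_alt lst
instance (lst : List String) (out : List (List String)) : Decidable (Spec_rotate_pairs lst out) := by unfold Spec_rotate_pairs; infer_instance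

-- ===== CLAIM (what is proved, stated in full; the proofs are below) =====
def Claim_equal_rotate_pairs : Prop := ∀ (lst : List String), Dom_rotate_pairs lst → Pre_rotate_pairs lst → Spec_rotate_pairs lst (rotate_pairs lst)
def Claim_raises_rotate_pairs : Prop := (∀ (lst : List String), Dom_rotate_pairs lst → Raises_rotate_pairs lst → ¬ Pre_rotate_pairs lst) ∧ (Dom_rotate_pairs (pvRaiseWitness_rotate_pairs) ∧ Raises_rotate_pairs (pvRaiseWitness_rotate_pairs) ∧ rotate_pairs_alt (pvRaiseWitness_rotate_pairs) = pvRaiseWitnessOut_rotate_pairs)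

-- ===== LEMMAS AND PROOFS =====

-- two strings pass A's character-wise test iff their shift-normalized keys agree
lemma irp_iff (xs : List Char) : ∀ (ys : List Char) (bx by' : Int), xs.length = ys.length →
    (irpLoop xs ys (bx - by') = true ↔
      xs.map (fun c => (c.toNat : Int) - bx) = ys.map (fun c => (c.toNat : Int) - by')) := by
  induction xs with
  | nil => intro ys bx by' h; cases ys <;> simp [irpLoop] at h ⊢
  | cons x xs ih =>
    intro ys bx by' h
    cases ys with
    | nil => simp at h
    | cons y ys =>
      simp only [List.length_cons, Nat.add_right_cancel_iff] at h
      simp only [irpLoop, List.map_cons, List.cons_eq_cons]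
      by_cases hxy : ((x.toNat : Int) - y.toNat) = bx - by'
      · rw [if_neg (by omega)]
        rw [ih ys bx by' h]
        constructor
        · intro hm; exact ⟨by omega, hm⟩
        · exact And.right
      · rw [if_pos (by omega)]
        constructor
        · intro hf; exact absurd hf (by simp)
        · intro ⟨h1, _⟩; exact absurd (by omega : ((x.toNat : Int) - y.toNat) = bx - by') hxy

lemma irp_key (s t : String) : is_rotate_pairs s t = decide (keyOf s = keyOf t) := by
  unfold is_rotate_pairs keyOf
  cases hs : s.toList with
  | nil =>
    cases ht : t.toList with
    | nil => simp [irpLoop]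
    | cons y ys => simp
  | cons x xs =>
    cases ht : t.toList with
    | nil => simp
    | cons y ys =>
      simp only [List.length_cons, List.tail_cons, List.headD_cons, List.map_cons]
      by_cases hlen : xs.length = ys.length
      · rw [if_neg (by omega)]
        by_cases hk : xs.map (fun c => (c.toNat : Int) - x.toNat) = ys.map (fun c => (c.toNat : Int) - y.toNat)
        · have h1 : irpLoop xs ys ((x.toNat : Int) - (y.toNat : Int)) = true :=
            (irp_iff xs ys (x.toNat : Int) (y.toNat : Int) hlen).mpr hk
          simp [h1, hk]
        · have h1 : irpLoop xs ys ((x.toNat : Int) - (y.toNat : Int)) = false := by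
            rw [Bool.eq_false_iff]
            intro h
            exact hk ((irp_iff xs ys (x.toNat : Int) (y.toNat : Int) hlen).mp h)
          simp [h1, hk]
      · rw [if_pos (by omega)]
        have : ¬ (xs.map (fun c => (c.toNat : Int) - x.toNat) = ys.map (fun c => (c.toNat : Int) - y.toNat)) := by
          intro hm
          have := congrArg List.length hm
          simp at this; omega
        simp [this]

-- A's inner accumulation: once s is in, everything just appends
lemma aStep_tt {s t : String} {out : List String} (hp : is_rotate_pairs s t = true)
    (hc : out.contains s = true) : aStep s out t = out ++ [t] := by
  unfold aStep; rw [if_pos hp, if_pos hc]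

lemma aStep_tt' {s t : String} {out : List String} (hp : is_rotate_pairs s t = true)
    (hc : out.contains s = false) : aStep s out t = (out ++ [s]) ++ [t] := by
  unfold aStep; rw [if_pos hp, if_neg (by simpa using hc)]

lemma aStep_ff {s t : String} {out : List String} (hp : is_rotate_pairs s t = false) :
    aStep s out t = out := by
  unfold aStep; rw [if_neg (by simp [hp])]

lemma innerfold_cons (s : String) (rest : List String) : ∀ (m : List String),
    rest.foldl (aStep s) (s :: m)
    = s :: (m ++ rest.filter (fun t => is_rotate_pairs s t)) := by
  induction rest with
  | nil => intro m; simp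
  | cons t rest ih =>
    intro m
    rw [List.foldl_cons]
    by_cases hp : is_rotate_pairs s t = true
    · rw [aStep_tt hp (by simp)]
      rw [show (s :: m) ++ [t] = s :: (m ++ [t]) from rfl]
      rw [ih (m ++ [t]), List.filter_cons, if_pos hp]
      simp
    · rw [aStep_ff (by simpa using hp), ih m, List.filter_cons, if_neg hp]

lemma innerfold_nil (s : String) (rest : List String) :
    rest.foldl (aStep s) []
    = (if (rest.filter (fun t => is_rotate_pairs s t)).isEmpty then []
       else s :: rest.filter (fun t => is_rotate_pairs s t)) := by
  induction rest with
  | nil => simp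
  | cons t rest ih =>
    rw [List.foldl_cons]
    by_cases hp : is_rotate_pairs s t = true
    · rw [aStep_tt' hp (by simp)]
      rw [show (([] : List String) ++ [s]) ++ [t] = s :: [t] from rfl]
      rw [innerfold_cons s rest [t], List.filter_cons, if_pos hp]
      simp
    · rw [aStep_ff (by simpa using hp), ih, List.filter_cons, if_neg hp]

-- the "first" half of buildMaps
def firstStep (d : PySem.Dict String Int) (p : Int × String) : PySem.Dict String Int :=
  if d.contains p.2 then d else d.insert p.2 p.1

lemma first_getD_contains (xs : List String) : ∀ (s0 : Int) (d : PySem.Dict String Int) (q : String),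
    d.contains q = true →
    ((PySem.List.enumerate xs s0).foldl firstStep d).getD q 0 = d.getD q 0 := by
  induction xs with
  | nil => intro s0 d q _; simp [PySem.List.enumerate_nil]
  | cons x xs ih =>
    intro s0 d q hq
    rw [PySem.List.enumerate_cons]
    simp only [List.foldl_cons]
    by_cases hx : d.contains x = true
    · rw [show firstStep d (s0, x) = d by simp [firstStep, hx]]
      exact ih _ d q hq
    · rw [show firstStep d (s0, x) = d.insert x s0 by simp [firstStep, hx]]
      have hne : q ≠ x := fun h => by subst h; rw [hq] at hx; simp at hx
      rw [ih _ _ q (by simp [PySem.Dict.contains_insert, hq])]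
      exact PySem.Dict.getD_insert_of_ne d s0 0 hne

lemma first_getD_fresh (xs : List String) : ∀ (s0 : Int) (d : PySem.Dict String Int) (q : String),
    q ∈ xs → d.contains q = false →
    ((PySem.List.enumerate xs s0).foldl firstStep d).getD q 0 = s0 + (xs.idxOf q : Int) := by
  induction xs with
  | nil => intro s0 d q hq _; simp at hq
  | cons x xs ih =>
    intro s0 d q hq hd
    rw [PySem.List.enumerate_cons]
    simp only [List.foldl_cons]
    by_cases hx : x = q
    · subst hx
      rw [show firstStep d (s0, x) = d.insert x s0 by simp [firstStep, hd]]
      rw [first_getD_contains xs _ _ x (by simp [PySem.Dict.contains_insert_self])]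
      simp [PySem.Dict.getD_insert_self, List.idxOf_cons_self]
    · have hq' : q ∈ xs := by
        rcases List.mem_cons.mp hq with h | h
        · exact absurd h.symm hx
        · exact h
      have hstep : (firstStep d (s0, x)).contains q = false := by
        by_cases hc : d.contains x = true
        · simpa [firstStep, hc] using hd
        · simp only [firstStep]
          rw [if_neg (by simp [hc])]
          rw [PySem.Dict.contains_insert]
          have hqx : ¬ q = x := fun h => hx h.symm
          simp [hd, hqx]
      rw [ih (s0 + 1) _ q hq' hstep]
      rw [List.idxOf_cons_ne _ hx]
      push_cast
      ring

-- the "groups" half of buildMaps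
def groupStep (d : PySem.Dict (List Int) (List Int)) (p : Int × String) :
    PySem.Dict (List Int) (List Int) :=
  d.modify (keyOf p.2) [] (fun g => g ++ [p.1])

lemma groups_getD (lst : List String) (k : List Int) :
    ((PySem.List.enumerate lst).foldl groupStep PySem.Dict.empty).getD k []
    = ((PySem.List.enumerate lst).filter (fun p => keyOf p.2 == k)).map (fun p => p.1) := by
  have hfold : (PySem.List.enumerate lst).foldl groupStep PySem.Dict.empty
      = (((PySem.List.enumerate lst).map (fun p => (keyOf p.2, p.1))).foldl
          (fun d p => d.modify p.1 [] (fun g => g ++ [p.2])) PySem.Dict.empty) := by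
    rw [List.foldl_map]
    rfl
  rw [hfold, PySem.Dict.getD_foldl_modify_append]
  rw [List.filter_map]
  simp [Function.comp_def]

-- indices of the key-k strings at or past position st, read back through lst, are the drop-filter
lemma enum_filter_drop (k : List Int) (xs : List String) : ∀ (s0 st : Nat),
    (((PySem.List.enumerate xs (s0 : Int)).filter
        (fun p => (keyOf p.2 == k) && decide (((s0 : Int) + (st : Int)) ≤ p.1))).map (fun p => p.2))
    = (xs.drop st).filter (fun t => keyOf t == k) := by
  induction xs with
  | nil => intro s0 st; simp [PySem.List.enumerate_nil]
  | cons x xs ih =>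
    intro s0 st
    rw [PySem.List.enumerate_cons]
    cases st with
    | zero =>
      simp only [List.filter_cons, List.drop_zero]
      have hc : ((keyOf x == k) && decide (((s0 : Int) + ((0:Nat) : Int)) ≤ (s0 : Int))) = (keyOf x == k) := by
        simp
      rw [hc]
      have hrec : ((PySem.List.enumerate xs ((s0 : Int) + 1)).filter
            (fun p => (keyOf p.2 == k) && decide (((s0 : Int) + ((0:Nat) : Int)) ≤ p.1)))
          = ((PySem.List.enumerate xs (((s0 + 1 : Nat)) : Int)).filter
            (fun p => (keyOf p.2 == k) && decide ((((s0 + 1 : Nat) : Int) + ((0:Nat) : Int)) ≤ p.1))) := by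
        apply List.filter_congr
        intro p hp
        rcases (PySem.List.mem_enumerate_iff _ _ _).mp hp with ⟨j, hj, rfl⟩
        simp only
        congr 1
        exact decide_eq_decide.mpr (by push_cast; omega)
      by_cases hk : (keyOf x == k) = true
      · rw [if_pos hk]
        simp only [List.map_cons, hk, if_pos]
        rw [hrec, ih (s0 + 1) 0]
        simp
      · rw [if_neg hk]
        simp only [hk, Bool.false_eq_true, if_false]
        rw [hrec, ih (s0 + 1) 0]
        simp
    | succ st' =>
      simp only [List.filter_cons]
      have hc : ((keyOf x == k) && decide (((s0 : Int) + ((st' + 1 : Nat) : Int)) ≤ (s0 : Int))) = false := by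
        simp
      rw [hc]
      simp only [Bool.false_eq_true, if_false, List.drop_succ_cons]
      have hrec : ((PySem.List.enumerate xs ((s0 : Int) + 1)).filter
            (fun p => (keyOf p.2 == k) && decide (((s0 : Int) + ((st' + 1 : Nat) : Int)) ≤ p.1)))
          = ((PySem.List.enumerate xs (((s0 + 1 : Nat)) : Int)).filter
            (fun p => (keyOf p.2 == k) && decide ((((s0 + 1 : Nat) : Int) + ((st' : Nat) : Int)) ≤ p.1))) := by
        apply List.filter_congr
        intro p hp
        rcases (PySem.List.mem_enumerate_iff _ _ _).mp hp with ⟨j, hj, rfl⟩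
        simp only
        congr 1
        exact decide_eq_decide.mpr (by push_cast; omega)
      rw [hrec, ih (s0 + 1) st']

lemma idxOf?_eq_some_idxOf (l : List String) (s : String) (h : s ∈ l) :
    List.idxOf? s l = some (l.idxOf s) := by
  induction l with
  | nil => simp at h
  | cons x xs ih =>
    by_cases hx : x = s
    · subst hx; simp [List.idxOf?_cons]
    · have hs : s ∈ xs := by
        rcases List.mem_cons.mp h with h' | h'
        · exact absurd h'.symm hx
        · exact h'
      simp [List.idxOf?_cons, hx, ih hs]

lemma beq_key (a b : List Int) : (a == b) = decide (b = a) := by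
  by_cases h : a = b
  · simp [h]
  · have h' : ¬ b = a := fun e => h e.symm
    simp [h, h']

-- ===== VERDICT (by name: the statement is the Claim_ definition above) =====
theorem rotate_pairs_spec : Claim_equal_rotate_pairs := by
  intro lst _ _
  unfold Spec_rotate_pairs
  have hA : rotate_pairs lst
      = lst.map (fun s => (lst.drop ((PySem.List.index? lst s).getD 0 + 1)).foldl (aStep s) []) := by
    show lst.foldl (fun output s =>
        output ++ [(lst.drop ((PySem.List.index? lst s).getD 0 + 1)).foldl (aStep s) []]) [] = _
    rw [PySem.List.foldl_append_singleton_eq_map]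
    rfl
  have hbm : buildMaps lst
      = ((PySem.List.enumerate lst).foldl firstStep PySem.Dict.empty,
         (PySem.List.enumerate lst).foldl groupStep PySem.Dict.empty) :=
    PySem.List.foldl_prod_mk firstStep groupStep (PySem.List.enumerate lst)
      PySem.Dict.empty PySem.Dict.empty
  have hB : rotate_pairs_alt lst
      = lst.map (fun s =>
          let start := ((PySem.List.enumerate lst).foldl firstStep PySem.Dict.empty).getD s 0 + 1
          let tail := ((((PySem.List.enumerate lst).foldl groupStep PySem.Dict.empty).getD (keyOf s) []).filter
              (fun i => start ≤ i)).map (fun i => PySem.List.pyGetD lst i "")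
          if tail.isEmpty then [] else s :: tail) := by
    show (let fg := buildMaps lst
          lst.map (fun s =>
            let start := fg.1.getD s 0 + 1
            let tail := ((fg.2.getD (keyOf s) []).filter (fun i => start ≤ i)).map
              (fun i => PySem.List.pyGetD lst i "")
            if tail.isEmpty then [] else s :: tail)) = _
    rw [show (let fg := buildMaps lst
          lst.map (fun s =>
            let start := fg.1.getD s 0 + 1
            let tail := ((fg.2.getD (keyOf s) []).filter (fun i => start ≤ i)).map
              (fun i => PySem.List.pyGetD lst i "")
            if tail.isEmpty then [] else s :: tail))
        = lst.map (fun s =>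
            let start := (buildMaps lst).1.getD s 0 + 1
            let tail := (((buildMaps lst).2.getD (keyOf s) []).filter (fun i => start ≤ i)).map
              (fun i => PySem.List.pyGetD lst i "")
            if tail.isEmpty then [] else s :: tail) from rfl]
    rw [hbm]
  rw [hA, hB]
  apply List.map_congr_left
  intro s hs
  -- the shared data of the two sides
  have hidx : PySem.List.index? lst s = some (lst.idxOf s) := by
    rw [PySem.List.index?_eq_idxOf?]
    exact idxOf?_eq_some_idxOf lst s hs
  have hfirst : ((PySem.List.enumerate lst).foldl firstStep PySem.Dict.empty).getD s 0
      = (lst.idxOf s : Int) := by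
    have := first_getD_fresh lst 0 PySem.Dict.empty s hs (by simp [PySem.Dict.contains_empty])
    simpa using this
  simp only [hidx, Option.getD_some, hfirst]
  -- A's inner loop is the key-filter of the tail of the list
  rw [innerfold_nil]
  -- B's tail is the same list
  have htail : ((((PySem.List.enumerate lst).foldl groupStep PySem.Dict.empty).getD (keyOf s) []).filter
        (fun i => decide ((lst.idxOf s : Int) + 1 ≤ i))).map (fun i => PySem.List.pyGetD lst i "")
      = (lst.drop (lst.idxOf s + 1)).filter (fun t => is_rotate_pairs s t) := by
    rw [groups_getD]
    rw [List.filter_map, List.map_map]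
    have hff : (((PySem.List.enumerate lst).filter (fun p => keyOf p.2 == keyOf s)).filter
          ((fun i => decide ((lst.idxOf s : Int) + 1 ≤ i)) ∘ (fun p => p.1)))
        = (PySem.List.enumerate lst).filter
            (fun p => (keyOf p.2 == keyOf s) && decide ((0 : Int) + ((lst.idxOf s + 1 : Nat) : Int) ≤ p.1)) := by
      rw [List.filter_filter]
      apply List.filter_congr
      intro p _
      simp only [Function.comp]
      rw [Bool.and_comm]
      congr 1
      exact decide_eq_decide.mpr (by push_cast; omega)
    rw [hff]
    have hmap : ((PySem.List.enumerate lst).filter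
          (fun p => (keyOf p.2 == keyOf s) && decide ((0 : Int) + ((lst.idxOf s + 1 : Nat) : Int) ≤ p.1))).map
          ((fun i => PySem.List.pyGetD lst i "") ∘ (fun p => p.1))
        = ((PySem.List.enumerate lst).filter
          (fun p => (keyOf p.2 == keyOf s) && decide ((0 : Int) + ((lst.idxOf s + 1 : Nat) : Int) ≤ p.1))).map
          (fun p => p.2) := by
      apply List.map_congr_left
      intro p hp
      have hp' := List.mem_of_mem_filter hp
      rcases (PySem.List.mem_enumerate_iff _ _ _).mp hp' with ⟨j, hj, rfl⟩
      simp [List.getD_eq_getElem?_getD, List.getElem?_eq_getElem hj]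
    rw [hmap]
    have := enum_filter_drop (keyOf s) lst 0 (lst.idxOf s + 1)
    rw [show ((0:Nat) : Int) = (0 : Int) from rfl] at this
    rw [this]
    apply List.filter_congr
    intro t _
    rw [irp_key, beq_key]
  simp only [htail]

@[simp] theorem rotate_pairs_raises : Claim_raises_rotate_pairs := by
  unfold Claim_raises_rotate_pairs
  constructor
  · intro lst _ hr hp
    unfold Raises_rotate_pairs at hr
    unfold Pre_rotate_pairs at hp
    omega
  · exact ⟨by decide, by decide, by decide⟩
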